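-- pv_equiv track=rewrite | github.com/sontung/location-based-generative | planner_rs.py | interpret_action
-- ===== SOURCE A (Python) =====
-- def find_top(up_rel, ob_start):
--     rel_res = None
--     while True:
--         done = True
--         for rel in up_rel:
--             if rel[2] == ob_start:
--                 ob_start = rel[0]
--                 done = False
--                 rel_res = rel
--                 break
--         if done:
--             return ob_start, rel_res
--
-- def interpret_action(sg_from, action):
--     assert action in ["12", "13", "21", "23", "31", "32"]
--     base_objs = ['0', '1', '2']
--     relations_from = sg_from[:]
--     block_from = int(action[0])-1
--     block_to = int(action[1])-1
--
--     # check valid action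
--     up_rel = [rel for rel in relations_from if rel[1] == "up"]
--
--     # modify "from" block
--     top_block_from, to_be_removed_rel = find_top(up_rel, base_objs[block_from])
--
--     # modify "to" block
--     top_block_to, _ = find_top(up_rel, base_objs[block_to])
--
--     assert top_block_from != top_block_to
--     return [top_block_from, "up", top_block_to]
-- ===== SOURCE B (Python) =====
-- def interpret_action(sg_from, action):
--     assert action in ["12", "13", "21", "23", "31", "32"]
--     base_objs = ['0', '1', '2']
--     # parent pointer of each block: upper block of the FIRST "up" relation it is below
--     step = {}
--     for rel in sg_from:
--         if rel[1] == "up" and rel[2] not in step: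
--             step[rel[2]] = rel[0]
--     # pointer doubling: after r rounds jump maps x to its 2^r-th ancestor (the top is
--     # its own ancestor), and 2**bit_length(n) > n bounds every acyclic chain's height
--     jump = step
--     for _ in range(len(sg_from).bit_length()):
--         jump = {k: jump.get(v, v) for k, v in jump.items()}
--     ob_from = base_objs[int(action[0]) - 1]
--     ob_to = base_objs[int(action[1]) - 1]
--     top_from = jump.get(ob_from, ob_from)
--     top_to = jump.get(ob_to, ob_to)
--     assert top_from != top_to
--     return [top_from, "up", top_to]
-- ===== Notes on version B (the rewrite author's own statement) =====
-- stated objective: alternative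
-- what changed: B replaces A's while-loop of linear rescans that climbs one relation at a time by a pointer-doubling (binary-jumping) table: a first-occurrence parent map is squared bit_length(n) times so a stack's top is read off with a single dict lookup.
import Mathlib
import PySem

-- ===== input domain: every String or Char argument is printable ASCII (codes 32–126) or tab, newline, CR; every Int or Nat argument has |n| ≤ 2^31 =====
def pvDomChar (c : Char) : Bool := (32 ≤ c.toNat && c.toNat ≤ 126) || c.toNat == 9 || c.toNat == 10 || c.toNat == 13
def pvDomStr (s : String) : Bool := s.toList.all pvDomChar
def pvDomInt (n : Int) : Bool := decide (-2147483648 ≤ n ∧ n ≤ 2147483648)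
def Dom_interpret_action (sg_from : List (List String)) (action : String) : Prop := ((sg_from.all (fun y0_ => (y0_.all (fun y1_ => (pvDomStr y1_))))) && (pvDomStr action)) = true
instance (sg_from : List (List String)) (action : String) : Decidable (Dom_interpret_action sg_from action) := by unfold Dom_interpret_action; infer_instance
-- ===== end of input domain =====

-- B replaces A's while-loop of linear rescans (climb one relation per pass) by a pointer-doubling
-- jump table: a first-occurrence parent dict squared bit_length(n) times, then one lookup per block.
-- Return value only; neither version mutates its arguments.

-- ===== PORT A =====
-- find_top's inner `for rel in up_rel: if rel[2] == ob_start: … break` is the first match;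
-- the `while True` loop becomes fuel recursion (fuel sg_from.length+1 suffices on every
-- terminating input; Pre_ excludes the cyclic inputs on which the Python loops forever).
def findTopA : Nat → List (List String) → String → Option (List String) → String × Option (List String)
  | 0, _, ob, res => (ob, res)
  | f + 1, up_rel, ob, res =>
    match up_rel.find? (fun rel => PySem.List.pyGet? rel 2 == some ob) with
    | some rel => findTopA f up_rel ((PySem.List.pyGet? rel 0).getD "") (some rel)
    | none => (ob, res)

-- int(action[i]) - 1 (exact on Pre_, where action is one of the six two-digit strings)
def blockIdxA (action : String) (i : Int) : Int :=
  ((PySem.Str.pyGet? action i).bind (fun c => PySem.Int.ofChars? [c])).getD 0 - 1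

def interpret_action (sg_from : List (List String)) (action : String) : List String :=
  let base_objs : List String := ["0", "1", "2"]
  let up_rel := sg_from.filter (fun rel => PySem.List.pyGet? rel 1 == some "up")
  let ob_from := (PySem.List.pyGet? base_objs (blockIdxA action 0)).getD ""
  let ob_to := (PySem.List.pyGet? base_objs (blockIdxA action 1)).getD ""
  let top_from := (findTopA (sg_from.length + 1) up_rel ob_from none).1
  let top_to := (findTopA (sg_from.length + 1) up_rel ob_to none).1
  [top_from, "up", top_to]

-- ===== PORT B =====
-- `if rel[1] == "up" and rel[2] not in step: step[rel[2]] = rel[0]` (first occurrence wins)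
def stepDictB (sg_from : List (List String)) : PySem.Dict String String :=
  sg_from.foldl
    (fun d rel =>
      if PySem.List.pyGet? rel 1 == some "up" then
        if d.contains ((PySem.List.pyGet? rel 2).getD "") then d
        else d.insert ((PySem.List.pyGet? rel 2).getD "") ((PySem.List.pyGet? rel 0).getD "")
      else d)
    PySem.Dict.empty

-- one round of `jump = {k: jump.get(v, v) for k, v in jump.items()}`
def doubleB (d : PySem.Dict String String) : PySem.Dict String String :=
  d.items.foldl (fun acc kv => acc.insert kv.1 (d.getD kv.2 kv.2)) PySem.Dict.empty

-- `for _ in range(len(sg_from).bit_length()): jump = …`; Python's bit_length on a Nat is Nat.size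
def interpret_action_alt (sg_from : List (List String)) (action : String) : List String :=
  let base_objs : List String := ["0", "1", "2"]
  let jump := doubleB^[sg_from.length.size] (stepDictB sg_from)
  let ob_from := (PySem.List.pyGet? base_objs (((PySem.Str.pyGet? action 0).bind (fun c => PySem.Int.ofChars? [c])).getD 0 - 1)).getD ""
  let ob_to := (PySem.List.pyGet? base_objs (((PySem.Str.pyGet? action 1).bind (fun c => PySem.Int.ofChars? [c])).getD 0 - 1)).getD ""
  let top_from := jump.getD ob_from ob_from
  let top_to := jump.getD ob_to ob_to
  [top_from, "up", top_to]

-- ===== PRECONDITION & SPEC =====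
-- helpers for Pre_ (independent of both ports): one step of the chain-climbing map, and the top it reaches
def pvStep (sg_from : List (List String)) (ob : String) : String :=
  match (sg_from.filter (fun rel => PySem.List.pyGet? rel 1 == some "up")).find?
      (fun rel => PySem.List.pyGet? rel 2 == some ob) with
  | some rel => (PySem.List.pyGet? rel 0).getD ""
  | none => ob

def pvFree (sg_from : List (List String)) (ob : String) : Bool :=
  ((sg_from.filter (fun rel => PySem.List.pyGet? rel 1 == some "up")).find?
      (fun rel => PySem.List.pyGet? rel 2 == some ob)).isNone

def pvStart (action : String) (i : Int) : String :=
  (PySem.List.pyGet? ["0", "1", "2"]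
      (((PySem.Str.pyGet? action i).bind (fun c => PySem.Int.ofChars? [c])).getD 0 - 1)).getD ""

-- Pre_ excludes exactly the inputs on which the Python A raises or loops forever: an action outside
-- the six legal strings (assert), a relation of length < 2 or an "up" relation of length < 3
-- (IndexError), a cyclic "up" chain from either start (find_top never returns), and the case where
-- both blocks resolve to the same top (assert top_block_from != top_block_to).
def Pre_interpret_action (sg_from : List (List String)) (action : String) : Prop :=
  action ∈ ["12", "13", "21", "23", "31", "32"] ∧
  (∀ rel ∈ sg_from, 2 ≤ rel.length) ∧
  (∀ rel ∈ sg_from, PySem.List.pyGet? rel 1 = some "up" → 3 ≤ rel.length) ∧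
  (∃ n ∈ List.range (sg_from.length + 1), pvFree sg_from ((pvStep sg_from)^[n] (pvStart action 0))) ∧
  (∃ n ∈ List.range (sg_from.length + 1), pvFree sg_from ((pvStep sg_from)^[n] (pvStart action 1))) ∧
  (pvStep sg_from)^[sg_from.length] (pvStart action 0) ≠ (pvStep sg_from)^[sg_from.length] (pvStart action 1)

instance (sg_from : List (List String)) (action : String) : Decidable (Pre_interpret_action sg_from action) := by
  unfold Pre_interpret_action; infer_instance

def pvWitness_interpret_action : List (List String) × String := ([["1", "up", "0"]], "13")

def Spec_interpret_action (sg_from : List (List String)) (action : String) (out : List String) : Prop := out = interpret_action_alt sg_from action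
instance (sg_from : List (List String)) (action : String) (out : List String) : Decidable (Spec_interpret_action sg_from action out) := by unfold Spec_interpret_action; infer_instance

-- ===== CLAIM (what is proved, stated in full; the proofs are below) =====
def Claim_equal_interpret_action : Prop := ∀ (sg_from : List (List String)) (action : String), Dom_interpret_action sg_from action → Pre_interpret_action sg_from action → Spec_interpret_action sg_from action (interpret_action sg_from action)

-- ===== LEMMAS AND PROOFS =====

-- A's find_top with any fuel iterates pvStep: the early exit happens only at a pvStep fixpoint
lemma findTopA_eq_iterate (sg : List (List String)) :
    ∀ (f : Nat) (ob : String) (res : Option (List String)),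
      (findTopA f (sg.filter (fun rel => PySem.List.pyGet? rel 1 == some "up")) ob res).1 =
      (pvStep sg)^[f] ob := by
  intro f
  induction f with
  | zero => intro ob res; rfl
  | succ f ih =>
    intro ob res
    rw [findTopA, Function.iterate_succ_apply]
    cases hfind : ((sg.filter (fun rel => PySem.List.pyGet? rel 1 == some "up")).find?
        (fun rel => PySem.List.pyGet? rel 2 == some ob)) with
    | none =>
      have hfix : pvStep sg ob = ob := by rw [pvStep, hfind]
      simp [hfix, Function.iterate_fixed hfix]
    | some rel =>
      have hstep : pvStep sg ob = (PySem.List.pyGet? rel 0).getD "" := by rw [pvStep, hfind]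
      rw [ih, hstep]

lemma pvFind?_congr {a : Type} (p q : a -> Bool) :
    forall l : List a, (forall x, x ∈ l -> p x = q x) -> l.find? p = l.find? q := by
  intro l
  induction l with
  | nil => intro _; rfl
  | cons x xs ih =>
    intro h
    rw [List.find?_cons, List.find?_cons, h x (by simp), ih (fun y hy => h y (by simp [hy]))]

-- the insert-if-absent loop keeps the FIRST relation per lower block
lemma get?_stepDictB_aux (sg : List (List String)) (d : PySem.Dict String String) (k : String) :
    (sg.foldl
      (fun d rel =>
        if PySem.List.pyGet? rel 1 == some "up" then
          if d.contains ((PySem.List.pyGet? rel 2).getD "") then d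
          else d.insert ((PySem.List.pyGet? rel 2).getD "") ((PySem.List.pyGet? rel 0).getD "")
        else d) d).get? k =
    ((d.get? k).or
      (((sg.filter (fun rel => PySem.List.pyGet? rel 1 == some "up")).find?
        (fun rel => ((PySem.List.pyGet? rel 2).getD "" : String) == k)).map
        (fun rel => (PySem.List.pyGet? rel 0).getD ""))) := by
  induction sg generalizing d with
  | nil => simp
  | cons rel rest ih =>
    by_cases hup : (PySem.List.pyGet? rel 1 == some "up") = true
    · rw [List.foldl_cons, if_pos hup, List.filter_cons, if_pos hup, List.find?_cons]
      by_cases hk : (((PySem.List.pyGet? rel 2).getD "" : String) == k) = true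
      · have hk' : ((PySem.List.pyGet? rel 2).getD "" : String) = k := by simpa using hk
        simp only [hk, Option.map_some]
        by_cases hc : d.contains ((PySem.List.pyGet? rel 2).getD "") = true
        · rw [if_pos hc, ih]
          have hsome : (d.get? k).isSome := by
            rw [← hk', ← PySem.Dict.contains_eq_isSome_get?]; exact hc
          cases hd : d.get? k with
          | none => rw [hd] at hsome; simp at hsome
          | some w => simp
        · rw [if_neg hc, ih]
          have hnone : d.get? k = none := by
            rw [← hk']
            have := PySem.Dict.contains_eq_isSome_get? d ((PySem.List.pyGet? rel 2).getD "")
            rw [this] at hc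
            cases h : d.get? ((PySem.List.pyGet? rel 2).getD "") with
            | none => rfl
            | some w => rw [h] at hc; simp at hc
          rw [hnone, hk', PySem.Dict.get?_insert_self]
          simp
      · simp only [hk]
        have hne : k ≠ ((PySem.List.pyGet? rel 2).getD "" : String) := by
          intro h; subst h; simp at hk
        by_cases hc : d.contains ((PySem.List.pyGet? rel 2).getD "") = true
        · rw [if_pos hc, ih]
        · rw [if_neg hc, ih, PySem.Dict.get?_insert_of_ne d _ hne]
    · rw [List.foldl_cons, if_neg hup, List.filter_cons, if_neg hup, ih]

lemma nodup_keys_stepDictB_aux (sg : List (List String)) (d : PySem.Dict String String)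
    (hd : d.keys.Nodup) :
    (sg.foldl
      (fun d rel =>
        if PySem.List.pyGet? rel 1 == some "up" then
          if d.contains ((PySem.List.pyGet? rel 2).getD "") then d
          else d.insert ((PySem.List.pyGet? rel 2).getD "") ((PySem.List.pyGet? rel 0).getD "")
        else d) d).keys.Nodup := by
  induction sg generalizing d with
  | nil => exact hd
  | cons rel rest ih =>
    rw [List.foldl_cons]
    split_ifs with h1 h2
    · exact ih d hd
    · exact ih _ (PySem.Dict.nodup_keys_insert d _ _ hd)
    · exact ih d hd

-- the dict comprehension: same keys, each value mapped through one more jump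
lemma items_doubleB (d : PySem.Dict String String) (hd : d.keys.Nodup) :
    (doubleB d).items = d.items.map (fun kv => (kv.1, d.getD kv.2 kv.2)) := by
  rw [doubleB]
  have h := PySem.Dict.items_foldl_insert_fresh (d := PySem.Dict.empty)
      (l := d.items) (k := fun kv => kv.1) (v := fun kv => d.getD kv.2 kv.2)
      (by intro a _; simp) (by simpa [PySem.Dict.keys] using hd)
  simpa using h

lemma keys_doubleB (d : PySem.Dict String String) (hd : d.keys.Nodup) :
    (doubleB d).keys = d.keys := by
  simp [PySem.Dict.keys, items_doubleB d hd, Function.comp]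

lemma get?_doubleB (d : PySem.Dict String String) (hd : d.keys.Nodup) (x : String) :
    (doubleB d).get? x = (d.get? x).map (fun v => d.getD v v) := by
  cases hx : d.get? x with
  | some v =>
    have hmem : (x, v) ∈ d.items := PySem.Dict.mem_items_of_get?_eq_some d hx
    have hmem' : (x, d.getD v v) ∈ (doubleB d).items := by
      rw [items_doubleB d hd]
      exact List.mem_map.mpr ⟨(x, v), hmem, rfl⟩
    have hnd' : (doubleB d).keys.Nodup := by rw [keys_doubleB d hd]; exact hd
    simpa using PySem.Dict.get?_of_mem_items (doubleB d) hmem' hnd'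
  | none =>
    have hx' : x ∉ d.keys := (PySem.Dict.get?_eq_none_iff_not_mem_keys d x).mp hx
    have : x ∉ (doubleB d).keys := by rw [keys_doubleB d hd]; exact hx'
    simpa using (PySem.Dict.get?_eq_none_iff_not_mem_keys (doubleB d) x).mpr this

-- the total lookup function jump.get(x, x) squares at every round
lemma getD_doubleB (d : PySem.Dict String String) (hd : d.keys.Nodup) (x : String) :
    (doubleB d).getD x x = d.getD ((d.getD x x)) (d.getD x x) := by
  cases hx : d.get? x with
  | some v =>
    have h1 : d.getD x x = v := by rw [PySem.Dict.getD_eq_get?_getD, hx]; rfl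
    have h2 : (doubleB d).getD x x = d.getD v v := by
      rw [PySem.Dict.getD_eq_get?_getD, get?_doubleB d hd x, hx]; rfl
    rw [h2, h1]
  | none =>
    have h1 : d.getD x x = x := by rw [PySem.Dict.getD_eq_get?_getD, hx]; rfl
    have h2 : (doubleB d).getD x x = x := by
      rw [PySem.Dict.getD_eq_get?_getD, get?_doubleB d hd x, hx]; rfl
    rw [h2, h1, h1]

lemma getD_doubleB_iterate (d : PySem.Dict String String) (hd : d.keys.Nodup) :
    ∀ (r : Nat) (x : String),
      (doubleB^[r] d).getD x x = (fun y => d.getD y y)^[2 ^ r] x := by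
  intro r
  induction r with
  | zero => intro x; simp
  | succ r ih =>
    intro x
    have hndr : (doubleB^[r] d).keys.Nodup := by
      clear ih x
      induction r with
      | zero => exact hd
      | succ r ih2 =>
        rw [Function.iterate_succ_apply', keys_doubleB _ ih2]; exact ih2
    rw [Function.iterate_succ_apply', getD_doubleB _ hndr, ih, ih]
    rw [pow_succ, mul_two, Function.iterate_add_apply]

-- the parent map of B computes pvStep (using that every "up" relation has length ≥ 3)
lemma getD_stepDictB (sg : List (List String))
    (H3 : ∀ rel ∈ sg, PySem.List.pyGet? rel 1 = some "up" → 3 ≤ rel.length) (x : String) :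
    (stepDictB sg).getD x x = pvStep sg x := by
  rw [stepDictB, PySem.Dict.getD_eq_get?_getD, get?_stepDictB_aux, pvStep]
  simp only [PySem.Dict.get?_empty, Option.none_or]
  have hcongr : ((sg.filter (fun rel => PySem.List.pyGet? rel 1 == some "up")).find?
      (fun rel => ((PySem.List.pyGet? rel 2).getD "" : String) == x)) =
      ((sg.filter (fun rel => PySem.List.pyGet? rel 1 == some "up")).find?
      (fun rel => PySem.List.pyGet? rel 2 == some x)) := by
    apply pvFind?_congr
    intro rel hrel
    have hup : PySem.List.pyGet? rel 1 = some "up" := by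
      have := List.of_mem_filter hrel
      simpa using this
    have hlen : 3 ≤ rel.length := H3 rel (List.mem_of_mem_filter hrel) hup
    obtain ⟨s, hs⟩ : ∃ s, PySem.List.pyGet? rel 2 = some s :=
      ⟨_, PySem.List.pyGet?_ofNat rel 2 (by omega)⟩
    rw [hs]
    simp [Option.getD]
  rw [hcongr]
  cases ((sg.filter (fun rel => PySem.List.pyGet? rel 1 == some "up")).find?
      (fun rel => PySem.List.pyGet? rel 2 == some x)) <;> rfl

lemma nodup_keys_stepDictB (sg : List (List String)) : (stepDictB sg).keys.Nodup :=
  nodup_keys_stepDictB_aux sg PySem.Dict.empty (by rw [PySem.Dict.keys_empty]; exact List.nodup_nil)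

-- once the chain reaches a free block, all longer iterates agree
lemma iterate_stable (sg : List (List String)) (x : String) (n N : Nat)
    (hfree : pvFree sg ((pvStep sg)^[n] x)) (hle : n ≤ N) :
    (pvStep sg)^[N] x = (pvStep sg)^[n] x := by
  have hfix : pvStep sg ((pvStep sg)^[n] x) = (pvStep sg)^[n] x := by
    rw [pvStep]
    rw [pvFree] at hfree
    cases hfind : ((sg.filter (fun rel => PySem.List.pyGet? rel 1 == some "up")).find?
        (fun rel => PySem.List.pyGet? rel 2 == some ((pvStep sg)^[n] x))) with
    | none => rfl
    | some rel => rw [hfind] at hfree; simp at hfree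
  calc (pvStep sg)^[N] x = (pvStep sg)^[N - n] ((pvStep sg)^[n] x) := by
        rw [← Function.iterate_add_apply]; congr 1; omega
    _ = (pvStep sg)^[n] x := Function.iterate_fixed hfix _

-- both ports compute the chain's top from a start that reaches a free block within n ≤ sg.length steps
lemma tops_agree (sg : List (List String))
    (H3 : ∀ rel ∈ sg, PySem.List.pyGet? rel 1 = some "up" → 3 ≤ rel.length)
    (x : String) (n : Nat) (hn : n ≤ sg.length)
    (hfree : pvFree sg ((pvStep sg)^[n] x)) :
    (findTopA (sg.length + 1) (sg.filter (fun rel => PySem.List.pyGet? rel 1 == some "up")) x none).1 =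
    (doubleB^[sg.length.size] (stepDictB sg)).getD x x := by
  rw [findTopA_eq_iterate, getD_doubleB_iterate _ (nodup_keys_stepDictB sg)]
  have hfun : (fun y => (stepDictB sg).getD y y) = pvStep sg := by
    funext y; exact getD_stepDictB sg H3 y
  rw [hfun]
  rw [iterate_stable sg x n _ hfree (by omega),
      iterate_stable sg x n _ hfree (le_of_lt (lt_of_le_of_lt hn (Nat.lt_size_self _)))]

-- ===== VERDICT (by name: the statement is the Claim_ definition above) =====
theorem interpret_action_spec : Claim_equal_interpret_action := by
  intro sg action _ hpre
  obtain ⟨-, -, H3, ⟨n0, hn0, hf0⟩, ⟨n1, hn1, hf1⟩, -⟩ := hpre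
  rw [List.mem_range] at hn0 hn1
  simp only [pvStart] at hf0 hf1
  unfold Spec_interpret_action interpret_action interpret_action_alt
  simp only [blockIdxA]
  rw [tops_agree sg H3 _ n0 (by omega) hf0, tops_agree sg H3 _ n1 (by omega) hf1]
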